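-- pv_equiv track=rewrite | github.com/ckouder/lsl2tt | lsl2tt.py | generateAtomicTruthTable
-- ===== SOURCE A (Python) =====
-- def generateAtomicTruthTable(symbols):
--     '''
--     generate atomic truth table for symbols
--     @param symbols: symbols
--     @return list: list of symbols and their corresponding truth values
--     '''
--     atomic_truth_table = {}
--     for i in symbols:
--         c = 2 ** symbols.index(i)
--         atomic_truth_table[i] = \
--         ([True for x in range(0, c)] + \
--         [False for y in range(0, c)]) * int((2 ** len(symbols)) / (c * 2))
--
--     return atomic_truth_table
-- ===== SOURCE B (Python) =====
-- def generateAtomicTruthTable(symbols):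
--     # Row-major: index each distinct symbol once, then decode every row's bits
--     # into the columns, instead of building each column from replicated blocks.
--     pos = {}
--     for idx, s in enumerate(symbols):
--         if s not in pos:
--             pos[s] = idx
--     names = list(pos.keys())
--     ks = list(pos.values())
--     cols = [[] for _ in ks]
--     for r in range(2 ** len(symbols)):
--         cols = [col + [(r // (2 ** k)) % 2 == 0] for col, k in zip(cols, ks)]
--     return dict(zip(names, cols))
-- ===== Notes on version B (the rewrite author's own statement) =====
-- stated objective: alternative
-- what changed: B indexes the distinct symbols once with a single enumerate pass, then builds the table row-major: one pass over the 2^n row indices that decodes each row's bits ((r >> k) & 1, written r // 2**k % 2) into every column, instead of A's per-symbol column construction by block replication ([True]*c + [False]*c) * m with a repeated symbols.index scan.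
import Mathlib
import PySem

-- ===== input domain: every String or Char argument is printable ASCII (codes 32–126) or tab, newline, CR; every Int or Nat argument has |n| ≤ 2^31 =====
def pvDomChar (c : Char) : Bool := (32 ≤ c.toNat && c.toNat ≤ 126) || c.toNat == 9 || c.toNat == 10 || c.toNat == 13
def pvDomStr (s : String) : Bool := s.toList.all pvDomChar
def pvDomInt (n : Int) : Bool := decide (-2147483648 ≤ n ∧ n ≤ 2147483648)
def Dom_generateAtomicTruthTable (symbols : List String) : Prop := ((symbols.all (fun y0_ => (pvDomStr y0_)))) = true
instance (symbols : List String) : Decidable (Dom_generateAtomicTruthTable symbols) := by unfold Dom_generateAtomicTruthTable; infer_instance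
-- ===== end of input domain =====

-- B builds the table row-major (one pass over the 2^n row indices, decoding each row's bits into
-- the columns, with symbols indexed once up front) instead of A's per-symbol block replication
-- with a repeated symbols.index scan; objective: alternative decomposition, not faster.


-- ===== PORT A =====
-- 'int((2 ** len(symbols)) / (c * 2))' is CPython float division of ints; it is ported as Nat
-- division, exact here: the quotient is the power of two 2^(n-1-index), exactly representable
-- in a float for n ≤ 1024 (Pre_ excludes the larger n, where CPython raises OverflowError).
def generateAtomicTruthTable (symbols : List String) : List (String × List Bool) :=
  (symbols.foldl (fun (d : PySem.Dict String (List Bool)) i =>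
      let c : Nat := 2 ^ ((PySem.List.index? symbols i).getD 0)
      d.insert i (PySem.List.pyRepeat
        ((PySem.List.pyRange 0 (c : Int)).map (fun _ => true) ++
         (PySem.List.pyRange 0 (c : Int)).map (fun _ => false))
        ((2 ^ symbols.length / (c * 2) : Nat) : Int)))
    PySem.Dict.empty).items

-- ===== PORT B =====
-- dict values are Python ints (bit positions), hence Int; they are always ≥ 0, so the Python
-- '2 ** k' is ported as (2 : Int) ^ k.toNat.
def generateAtomicTruthTable_alt (symbols : List String) : List (String × List Bool) :=
  let pos : PySem.Dict String Int :=
    (PySem.List.enumerate symbols).foldl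
      (fun pos p => if pos.contains p.2 then pos else pos.insert p.2 p.1) PySem.Dict.empty
  let names := pos.keys
  let ks := pos.values
  let cols :=
    (PySem.List.pyRange 0 ((2 : Int) ^ symbols.length)).foldl
      (fun cols r => List.zipWith
        (fun (col : List Bool) (k : Int) =>
          col ++ [decide (PySem.Int.mod (PySem.Int.floordiv r ((2 : Int) ^ k.toNat)) 2 = 0)])
        cols ks)
      (ks.map (fun _ => ([] : List Bool)))
  names.zip cols

-- ===== PRECONDITION & SPEC =====
-- Pre_ excludes only lists of more than 1024 symbols: there A raises OverflowError (the float
-- division '(2 ** len(symbols)) / (c * 2)' overflows a float); for every admitted length that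
-- division is exact, so nothing else is excluded.
def Pre_generateAtomicTruthTable (symbols : List String) : Prop := symbols.length ≤ 1024
instance (symbols : List String) : Decidable (Pre_generateAtomicTruthTable symbols) := by
  unfold Pre_generateAtomicTruthTable; infer_instance

def pvWitness_generateAtomicTruthTable : List String := ["p", "q", "p"]

def Spec_generateAtomicTruthTable (symbols : List String) (out : List (String × List Bool)) : Prop := out = generateAtomicTruthTable_alt symbols
instance (symbols : List String) (out : List (String × List Bool)) : Decidable (Spec_generateAtomicTruthTable symbols out) := by unfold Spec_generateAtomicTruthTable; infer_instance

-- ===== CLAIM (what is proved, stated in full; the proofs are below) =====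
def Claim_equal_generateAtomicTruthTable : Prop := ∀ (symbols : List String), Dom_generateAtomicTruthTable symbols → Pre_generateAtomicTruthTable symbols → Spec_generateAtomicTruthTable symbols (generateAtomicTruthTable symbols)

-- ===== LEMMAS AND PROOFS =====

-- the value A inserts for symbol i (identical to the body of A's loop)
def pvAVal (symbols : List String) (i : String) : List Bool :=
  let c : Nat := 2 ^ ((PySem.List.index? symbols i).getD 0)
  PySem.List.pyRepeat
    ((PySem.List.pyRange 0 (c : Int)).map (fun _ => true) ++
     (PySem.List.pyRange 0 (c : Int)).map (fun _ => false))
    ((2 ^ symbols.length / (c * 2) : Nat) : Int)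

lemma pv_zipWith_self {α β : Type} (h : α → α → β) :
    ∀ l : List α, List.zipWith h l l = l.map (fun x => h x x) := by
  intro l; induction l with
  | nil => rfl
  | cons x xs _ => simp [List.zipWith]

lemma pv_idxOf?_of_mem {l : List String} {s : String} (h : s ∈ l) :
    List.idxOf? s l = some (l.idxOf s) := by
  induction l with
  | nil => simp at h
  | cons a l ih =>
    by_cases ha : a = s
    · simp [List.idxOf?_cons, ha]
    · have hs : s ∈ l := by
        rcases List.mem_cons.mp h with h1 | h1
        · exact absurd h1.symm ha
        · exact h1
      simp [List.idxOf?_cons, ha, ih hs]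

-- A's loop: inserting, for each element of l, a value depending only on the key, starting from a
-- dict whose items are ks.map (s, v s) with ks nodup, yields (Set.update ks l).map (s, v s)
lemma pv_foldl_insert_keyfun (v : String → List Bool) :
    ∀ (l : List String) (ks : List String), ks.Nodup →
      ((l.foldl (fun (d : PySem.Dict String (List Bool)) x => d.insert x (v x))
        ⟨ks.map (fun s => (s, v s))⟩).items)
      = (PySem.Set.update ks l).map (fun s => (s, v s)) := by
  intro l
  induction l with
  | nil => intro ks _; simp [PySem.Set.update_nil]
  | cons x l ih =>
    intro ks hnd
    simp only [List.foldl_cons, PySem.Set.update_cons]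
    by_cases hx : x ∈ ks
    · have hc : (⟨ks.map (fun s => (s, v s))⟩ : PySem.Dict String (List Bool)).contains x = true := by
        simp only [PySem.Dict.contains, List.any_map]
        simp only [List.any_eq_true]
        exact ⟨x, hx, by simp⟩
      have hins : (⟨ks.map (fun s => (s, v s))⟩ : PySem.Dict String (List Bool)).insert x (v x)
          = ⟨ks.map (fun s => (s, v s))⟩ := by
        apply PySem.Dict.ext
        rw [PySem.Dict.items_insert_of_contains _ _ hc]
        show List.map _ (ks.map _) = ks.map _
        rw [List.map_map]
        apply List.map_congr_left
        intro s _
        by_cases hsx : s = x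
        · simp [hsx]
        · simp [Function.comp, hsx]
      rw [hins, PySem.Set.add_of_mem hx]
      exact ih ks hnd
    · have hc : (⟨ks.map (fun s => (s, v s))⟩ : PySem.Dict String (List Bool)).contains x = false := by
        simp only [PySem.Dict.contains, List.any_map]
        simp only [List.any_eq_false]
        intro s hs
        simp only [Function.comp_apply, beq_iff_eq]
        intro hsx
        exact hx (hsx ▸ hs)
      have hins : (⟨ks.map (fun s => (s, v s))⟩ : PySem.Dict String (List Bool)).insert x (v x)
          = ⟨(ks ++ [x]).map (fun s => (s, v s))⟩ := by
        apply PySem.Dict.ext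
        rw [PySem.Dict.items_insert_of_not_contains _ _ hc]
        show ks.map (fun s => (s, v s)) ++ [(x, v x)] = (ks ++ [x]).map (fun s => (s, v s))
        simp
      rw [hins, PySem.Set.add_of_not_mem hx]
      refine ih (ks ++ [x]) ?_
      simp [List.nodup_append, hnd]
      intro a ha hax
      exact hx (hax ▸ ha)

-- B's pos loop, generalized over the enumeration start and the already-built dict
lemma pv_tail_eq (l : List String) (j : Nat) (s : String) (Q : String → Bool)
    (hQs : ∀ t, Q t = true → t ≠ s) :
    ((PySem.List.dedup l).filter Q).map
        (fun t => (t, (((j + 1 : Nat) : Int) + ((List.idxOf t l : Nat) : Int))))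
    = ((PySem.Set.ofList l).filter Q).map
        (fun t => (t, ((j : Int) + ((List.idxOf t (s :: l) : Nat) : Int)))) := by
  rw [PySem.List.dedup_eq_ofList]
  apply List.map_congr_left
  intro t ht
  have hQ := (List.mem_filter.mp ht).2
  have htne : t ≠ s := hQs t hQ
  have hbe : (s == t) = false := beq_eq_false_iff_ne.mpr (fun h => htne h.symm)
  have hidx : List.idxOf t (s :: l) = List.idxOf t l + 1 := by
    simp [List.idxOf_cons, hbe]
  rw [hidx]
  congr 1
  push_cast
  ring

lemma pv_pos_fold (l : List String) :
    ∀ (j : Nat) (init : List (String × Int)),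
      (((PySem.List.enumerate l (j : Int)).foldl
          (fun (d : PySem.Dict String Int) p => if d.contains p.2 then d else d.insert p.2 p.1)
          ⟨init⟩).items)
      = init ++ ((PySem.List.dedup l).filter
            (fun s => !(init.map Prod.fst).contains s)).map
            (fun s => (s, ((j : Int) + (l.idxOf s : Int)))) := by
  induction l with
  | nil =>
    intro j init
    simp [PySem.List.enumerate_nil, PySem.List.dedup_eq_ofList, PySem.Set.ofList_nil]
  | cons s l ih =>
    intro j init
    rw [PySem.List.enumerate_cons]
    simp only [List.foldl_cons]
    by_cases hs : s ∈ init.map Prod.fst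
    · have hc : (⟨init⟩ : PySem.Dict String Int).contains s = true := by
        rcases List.mem_map.mp hs with ⟨p, hp, hps⟩
        simp only [PySem.Dict.contains, List.any_eq_true]
        exact ⟨p, hp, by simp [hps]⟩
      rw [hc]
      simp only [if_true]
      have hj1 : ((j : Int) + 1) = ((j + 1 : Nat) : Int) := by push_cast; ring
      rw [hj1, ih (j + 1) init]
      congr 1
      rw [PySem.List.dedup_eq_ofList (s :: l), PySem.Set.ofList_cons]
      have hPs : (!(init.map Prod.fst).contains s) = false := by
        rw [List.contains_eq_mem]; simp [hs]
      rw [List.filter_cons_of_neg (by rw [hPs]; simp)]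
      simp only [PySem.Set.discard, List.filter_filter]
      have hflt : (PySem.Set.ofList l).filter
            (fun t => (!(init.map Prod.fst).contains t) && !(t == s))
          = (PySem.Set.ofList l).filter (fun t => !(init.map Prod.fst).contains t) := by
        apply List.filter_congr
        intro t _
        by_cases ht : t ∈ init.map Prod.fst
        · rw [List.contains_eq_mem]; simp [ht]
        · rw [List.contains_eq_mem]
          simp only [ht, decide_false, Bool.not_false, Bool.true_and]
          have : t ≠ s := fun h => ht (h ▸ hs)
          simp [this]
      rw [hflt]
      exact pv_tail_eq l j s _ (fun t hQ => by
        intro h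
        rw [h, List.contains_eq_mem] at hQ
        simp [hs] at hQ)
    · have hc : (⟨init⟩ : PySem.Dict String Int).contains s = false := by
        simp only [PySem.Dict.contains, List.any_eq_false]
        intro p hp
        simp only [beq_iff_eq]
        intro hps
        exact hs (List.mem_map.mpr ⟨p, hp, hps⟩)
      rw [hc]
      simp only [Bool.false_eq_true, if_false]
      have hins : (⟨init⟩ : PySem.Dict String Int).insert s (j : Int)
          = ⟨init ++ [(s, (j : Int))]⟩ := by
        apply PySem.Dict.ext
        rw [PySem.Dict.items_insert_of_not_contains _ _ hc]
      rw [hins]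
      have hj1 : ((j : Int) + 1) = ((j + 1 : Nat) : Int) := by push_cast; ring
      rw [hj1, ih (j + 1) (init ++ [(s, (j : Int))])]
      rw [PySem.List.dedup_eq_ofList (s :: l), PySem.Set.ofList_cons]
      have hPs : (!(init.map Prod.fst).contains s) = true := by
        rw [List.contains_eq_mem]; simp [hs]
      rw [List.filter_cons_of_pos (by rw [hPs])]
      rw [List.map_cons]
      have hhead : ((j : Int) + ((List.idxOf s (s :: l) : Nat) : Int)) = (j : Int) := by
        simp
      rw [hhead, List.append_assoc]
      congr 1
      rw [List.singleton_append]
      congr 1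
      simp only [PySem.Set.discard, List.filter_filter]
      have hflt : (PySem.List.dedup l).filter
            (fun t => !((init ++ [(s, (j : Int))]).map Prod.fst).contains t)
          = (PySem.List.dedup l).filter
            (fun t => (!(init.map Prod.fst).contains t) && !(t == s)) := by
        apply List.filter_congr
        intro t _
        simp only [List.map_append, List.map_cons, List.map_nil]
        rw [List.contains_eq_mem, List.contains_eq_mem]
        by_cases hts : t = s
        · simp [hts]
        · by_cases ht : t ∈ init.map Prod.fst <;> simp [List.mem_append, ht, hts]
      rw [hflt]
      exact pv_tail_eq l j s _ (fun t hQ => by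
        intro h
        rw [h] at hQ
        simp at hQ)

-- B's cols loop: folding the per-row zipWith step over any row list rs
lemma pv_cols_fold (f : Int → Int → Bool) (ks : List Int) :
    ∀ (rs : List Int) (g : Int → List Bool),
      rs.foldl (fun cols r => List.zipWith (fun col k => col ++ [f r k]) cols ks) (ks.map g)
      = ks.map (fun k => g k ++ rs.map (fun r => f r k)) := by
  intro rs
  induction rs with
  | nil => intro g; simp
  | cons r rs ih =>
    intro g
    simp only [List.foldl_cons]
    rw [List.zipWith_map_left, pv_zipWith_self]
    rw [ih (fun k => g k ++ [f r k])]
    apply List.map_congr_left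
    intro k _
    simp

-- one period of A's block pattern
lemma pv_block_base (c : Nat) (hc : 0 < c) :
    (List.range (2 * c)).map (fun j => decide (j / c % 2 = 0))
    = List.replicate c true ++ List.replicate c false := by
  have h2 : 2 * c = c + c := by omega
  rw [h2, List.range_add, List.map_append, List.map_map]
  congr 1
  · calc (List.range c).map (fun j => decide (j / c % 2 = 0))
        = (List.range c).map (fun _ => true) := by
          apply List.map_congr_left
          intro j hj
          have : j < c := List.mem_range.mp hj
          simp [Nat.div_eq_of_lt this]
      _ = List.replicate c true := by simp [List.map_const']
  · calc (List.range c).map ((fun j => decide (j / c % 2 = 0)) ∘ (fun x => c + x))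
        = (List.range c).map (fun _ => false) := by
          apply List.map_congr_left
          intro j hj
          have hj' : j < c := List.mem_range.mp hj
          have hdiv : (c + j) / c = j / c + 1 := by
            have := Nat.add_mul_div_left j 1 hc
            simpa [Nat.mul_one, Nat.add_comm] using this
          simp [Function.comp, hdiv, Nat.div_eq_of_lt hj']
      _ = List.replicate c false := by simp [List.map_const']

-- A's replicated block column, as a map over row indices
lemma pv_block_eq (c : Nat) (hc : 0 < c) :
    ∀ (m : Nat),
      (List.replicate m (List.replicate c true ++ List.replicate c false)).flatten
      = (List.range (2 * c * m)).map (fun j => decide (j / c % 2 = 0)) := by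
  intro m
  induction m with
  | zero => simp
  | succ m ih =>
    rw [List.replicate_succ, List.flatten_cons, ih]
    have h1 : 2 * c * (m + 1) = 2 * c + 2 * c * m := by ring
    rw [h1, List.range_add, List.map_append, pv_block_base c hc, List.map_map]
    congr 1
    apply List.map_congr_left
    intro j _
    have hdiv : (2 * c + j) / c = j / c + 2 := by
      have h := Nat.add_mul_div_left j 2 hc
      have h2 : 2 * c + j = j + c * 2 := by ring
      rw [h2, h]
    simp [Function.comp, hdiv, Nat.add_mod_right]

-- per-symbol agreement: A's block column for first index k < n is B's decoded column
lemma pv_col_agree (n k : Nat) (hk : k < n) :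
    PySem.List.pyRepeat
      ((PySem.List.pyRange 0 ((2 ^ k : Nat) : Int)).map (fun _ => true) ++
       (PySem.List.pyRange 0 ((2 ^ k : Nat) : Int)).map (fun _ => false))
      ((2 ^ n / (2 ^ k * 2) : Nat) : Int)
    = (PySem.List.pyRange 0 ((2 : Int) ^ n)).map
        (fun r => decide (PySem.Int.mod (PySem.Int.floordiv r ((2 : Int) ^ (((k : Nat) : Int)).toNat)) 2 = 0)) := by
  have hc : 0 < 2 ^ k := Nat.pow_pos (by omega)
  have hdvd : 2 ^ k * 2 ∣ 2 ^ n := by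
    have h : (2 : Nat) ^ (k + 1) ∣ 2 ^ n := pow_dvd_pow 2 (by omega)
    simpa [pow_succ] using h
  have hmn : 2 * 2 ^ k * (2 ^ n / (2 ^ k * 2)) = 2 ^ n := by
    have h := Nat.div_mul_cancel hdvd
    calc 2 * 2 ^ k * (2 ^ n / (2 ^ k * 2)) = 2 ^ n / (2 ^ k * 2) * (2 ^ k * 2) := by ring
      _ = 2 ^ n := h
  have hT : (PySem.List.pyRange 0 ((2 ^ k : Nat) : Int)).map (fun _ => true)
      = List.replicate (2 ^ k) true := by
    rw [PySem.List.pyRange_zero_natCast, List.map_map]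
    simp [List.map_const']
  have hF : (PySem.List.pyRange 0 ((2 ^ k : Nat) : Int)).map (fun _ => false)
      = List.replicate (2 ^ k) false := by
    rw [PySem.List.pyRange_zero_natCast, List.map_map]
    simp [List.map_const']
  rw [hT, hF]
  simp only [PySem.List.pyRepeat, Int.toNat_natCast]
  rw [pv_block_eq (2 ^ k) hc (2 ^ n / (2 ^ k * 2)), hmn]
  have h2n : ((2 : Int) ^ n) = ((2 ^ n : Nat) : Int) := by push_cast; ring
  rw [h2n, PySem.List.pyRange_zero_natCast, List.map_map]
  apply List.map_congr_left
  intro j _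
  have e2 : ((2 : Int) ^ k) = ((2 ^ k : Nat) : Int) := by push_cast; ring
  have e4 : PySem.Int.floordiv (j : Int) ((2 ^ k : Nat) : Int) = ((j / 2 ^ k : Nat) : Int) :=
    PySem.Int.floordiv_natCast j (2 ^ k)
  have e5 : PySem.Int.mod ((j / 2 ^ k : Nat) : Int) 2 = ((j / 2 ^ k % 2 : Nat) : Int) := by
    simpa using PySem.Int.mod_natCast (j / 2 ^ k) 2
  simp only [Function.comp, e2, e4, e5]
  have hiff : (j / 2 ^ k % 2 = 0) ↔ (((j / 2 ^ k % 2 : Nat) : Int) = 0) := by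
    exact_mod_cast Iff.rfl
  exact decide_eq_decide.mpr hiff

-- ===== VERDICT (by name: the statement is the Claim_ definition above) =====
theorem generateAtomicTruthTable_spec : Claim_equal_generateAtomicTruthTable := by
  intro symbols _ _
  unfold Spec_generateAtomicTruthTable
  -- A's result
  have hA : generateAtomicTruthTable symbols
      = (PySem.Set.ofList symbols).map (fun s => (s, pvAVal symbols s)) := by
    have h := pv_foldl_insert_keyfun (pvAVal symbols) symbols [] List.nodup_nil
    unfold generateAtomicTruthTable
    exact h.trans (by rw [PySem.Set.update_nil_left])
  -- B's pos dict
  have hitems : ((PySem.List.enumerate symbols 0).foldl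
      (fun (d : PySem.Dict String Int) p => if d.contains p.2 then d else d.insert p.2 p.1)
      PySem.Dict.empty).items
      = (PySem.Set.ofList symbols).map (fun s => (s, ((symbols.idxOf s : Nat) : Int))) := by
    have h := pv_pos_fold symbols 0 []
    refine Eq.trans ?_ (h.trans ?_)
    · rfl
    · rw [PySem.List.dedup_eq_ofList]
      simp only [List.map_nil, List.contains_eq_mem, List.not_mem_nil, decide_false,
        Bool.not_false, List.filter_true, List.nil_append]
      apply List.map_congr_left
      intro s _
      simp
  have hdict : ((PySem.List.enumerate symbols 0).foldl
      (fun (d : PySem.Dict String Int) p => if d.contains p.2 then d else d.insert p.2 p.1)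
      PySem.Dict.empty)
      = ⟨(PySem.Set.ofList symbols).map (fun s => (s, ((symbols.idxOf s : Nat) : Int)))⟩ :=
    PySem.Dict.ext hitems
  -- B's result
  have hB : generateAtomicTruthTable_alt symbols
      = (PySem.Set.ofList symbols).map (fun s => (s,
          (PySem.List.pyRange 0 ((2 : Int) ^ symbols.length)).map
            (fun r => decide (PySem.Int.mod
              (PySem.Int.floordiv r ((2 : Int) ^ (((symbols.idxOf s : Nat) : Int)).toNat)) 2 = 0)))) := by
    unfold generateAtomicTruthTable_alt
    rw [hdict]
    simp only [PySem.Dict.keys, PySem.Dict.values]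
    rw [pv_cols_fold
      (fun r k => decide (PySem.Int.mod (PySem.Int.floordiv r ((2 : Int) ^ k.toNat)) 2 = 0))
      (List.map (fun (x : String × Int) => x.2)
        (List.map (fun s => (s, ((symbols.idxOf s : Nat) : Int))) (PySem.Set.ofList symbols)))
      (PySem.List.pyRange 0 ((2 : Int) ^ symbols.length)) (fun _ => [])]
    simp only [List.map_map]
    rw [List.zip_map']
    apply List.map_congr_left
    intro s _
    simp
  rw [hA, hB]
  apply List.map_congr_left
  intro s hs
  have hsm : s ∈ symbols := by rwa [PySem.Set.mem_ofList] at hs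
  have hidx : PySem.List.index? symbols s = some (symbols.idxOf s) := by
    rw [PySem.List.index?_eq_idxOf?]
    exact pv_idxOf?_of_mem hsm
  have hklt : symbols.idxOf s < symbols.length := List.idxOf_lt_length_of_mem hsm
  have hval : pvAVal symbols s
      = (PySem.List.pyRange 0 ((2 : Int) ^ symbols.length)).map
          (fun r => decide (PySem.Int.mod
            (PySem.Int.floordiv r ((2 : Int) ^ (((symbols.idxOf s : Nat) : Int)).toNat)) 2 = 0)) := by
    unfold pvAVal
    rw [hidx]
    exact pv_col_agree symbols.length (symbols.idxOf s) hklt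
  rw [hval]
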